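-- pv_equiv track=rewrite | github.com/fischmanb/superloop | py/auto_sdd/lib/drift.py | _parse_signal
-- ===== SOURCE A (Python) =====
-- def _parse_signal(signal_name: str, output: str) -> str:
--     """Extract the last value of a named signal from multiline output.
--
--     Args:
--         signal_name: The signal prefix (e.g. ``"SPEC_FILE"``).
--         output: Multiline text to search.
--
--     Returns:
--         The stripped value, or empty string if not found.
--     """
--     last_value = ""
--     prefix = f"{signal_name}:"
--     for line in output.splitlines():
--         stripped = line.strip()
--         if stripped.startswith(prefix):
--             value = stripped[len(prefix):].strip()
--             last_value = value
--     return last_value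
-- ===== SOURCE B (Python) =====
-- def _parse_signal(signal_name: str, output: str) -> str:
--     prefix = f"{signal_name}:"
--     for line in reversed(output.splitlines()):
--         stripped = line.strip()
--         if stripped.startswith(prefix):
--             return stripped[len(prefix):].strip()
--     return ""
-- ===== Notes on version B (the rewrite author's own statement) =====
-- stated objective: alternative
-- what changed: Scan the lines in reverse and return on the first match (which is the last occurrence), instead of a forward scan that keeps overwriting an accumulator.
import Mathlib
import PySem

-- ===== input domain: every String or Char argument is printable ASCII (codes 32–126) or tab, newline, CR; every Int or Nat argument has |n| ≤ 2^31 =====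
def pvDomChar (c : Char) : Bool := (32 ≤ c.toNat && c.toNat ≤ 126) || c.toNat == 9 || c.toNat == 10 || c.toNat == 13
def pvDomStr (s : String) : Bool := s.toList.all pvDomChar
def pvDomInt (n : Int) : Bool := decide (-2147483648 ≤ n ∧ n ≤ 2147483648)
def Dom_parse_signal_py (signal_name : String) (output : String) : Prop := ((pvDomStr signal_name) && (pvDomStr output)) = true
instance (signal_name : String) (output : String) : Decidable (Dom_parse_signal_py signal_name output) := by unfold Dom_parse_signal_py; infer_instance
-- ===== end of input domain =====

-- B scans the lines in reverse and returns at the first match (= last occurrence); same result, different decomposition.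

-- ===== PORT A =====
-- forward loop overwriting the accumulator `last_value`
def parse_signal_py (signal_name : String) (output : String) : String :=
  let pre := signal_name ++ ":"
  (PySem.Str.splitlines output).foldl
    (fun last_value line =>
      let stripped := PySem.Str.strip line
      if PySem.Str.startswith stripped pre then
        PySem.Str.strip (PySem.Str.slice stripped (some (PySem.Str.len pre)) none)
      else last_value) ""

-- ===== PORT B =====
-- recursion over the reversed line list, returning at the first match
def parse_signal_py_altAux (pre : String) : List String → String
  | [] => ""
  | line :: rest =>
    let stripped := PySem.Str.strip line
    if PySem.Str.startswith stripped pre then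
      PySem.Str.strip (PySem.Str.slice stripped (some (PySem.Str.len pre)) none)
    else parse_signal_py_altAux pre rest

def parse_signal_py_alt (signal_name : String) (output : String) : String :=
  parse_signal_py_altAux (signal_name ++ ":") (PySem.Str.splitlines output).reverse

-- ===== PRECONDITION & SPEC =====
def Spec_parse_signal_py (signal_name : String) (output : String) (out : String) : Prop := out = parse_signal_py_alt signal_name output
instance (signal_name : String) (output : String) (out : String) : Decidable (Spec_parse_signal_py signal_name output out) := by unfold Spec_parse_signal_py; infer_instance

-- ===== CLAIM (what is proved, stated in full; the proofs are below) =====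
def Claim_equal_parse_signal_py : Prop := ∀ (signal_name : String) (output : String), Dom_parse_signal_py signal_name output → Spec_parse_signal_py signal_name output (parse_signal_py signal_name output)

-- ===== LEMMAS AND PROOFS =====
theorem foldl_eq_altAux (pre : String) (l : List String) :
    l.foldl
      (fun last_value line =>
        let stripped := PySem.Str.strip line
        if PySem.Str.startswith stripped pre then
          PySem.Str.strip (PySem.Str.slice stripped (some (PySem.Str.len pre)) none)
        else last_value) ""
    = parse_signal_py_altAux pre l.reverse := by
  induction l using List.reverseRecOn with
  | nil => rfl
  | append_singleton l x ih =>
    simp only [List.foldl_append, List.foldl_cons, List.foldl_nil, List.reverse_append,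
      List.reverse_singleton, List.singleton_append, parse_signal_py_altAux, ih]

-- ===== VERDICT (by name: the statement is the Claim_ definition above) =====
theorem parse_signal_py_spec : Claim_equal_parse_signal_py := by
  intro signal_name output _
  unfold Spec_parse_signal_py parse_signal_py parse_signal_py_alt
  exact foldl_eq_altAux _ _
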